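-- pv_equiv track=rewrite | github.com/Parvez13/Placement_Assignment-Sohail_Parvez- | Pre_Placement/Assignment/Arrays_Lecture_2/question_8.py | solution
-- ===== SOURCE A (Python) =====
-- def solution(nums, k):
--     if k == 0:
--         return 0
--     sol_array = []
--     for i in range(len(nums)):
--         for x in range(-k,k+1):
--             temp_array = []
--             temp_array.append(nums[i]+x)
--             sol_array.extend(temp_array)
--     return max(sol_array)-min(sol_array)
-- ===== SOURCE B (Python) =====
-- def solution(nums, k):
--     if k == 0:
--         return 0
--     return max(nums) - min(nums) + 2 * k
-- ===== Notes on version B (the rewrite author's own statement) =====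
-- stated objective: faster
-- what changed: Replaces the O(n*k) materialisation of every nums[i]+x (x in -k..k) with the closed form max(nums)-min(nums)+2k, keeping A's k==0 special case.
import Mathlib
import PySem

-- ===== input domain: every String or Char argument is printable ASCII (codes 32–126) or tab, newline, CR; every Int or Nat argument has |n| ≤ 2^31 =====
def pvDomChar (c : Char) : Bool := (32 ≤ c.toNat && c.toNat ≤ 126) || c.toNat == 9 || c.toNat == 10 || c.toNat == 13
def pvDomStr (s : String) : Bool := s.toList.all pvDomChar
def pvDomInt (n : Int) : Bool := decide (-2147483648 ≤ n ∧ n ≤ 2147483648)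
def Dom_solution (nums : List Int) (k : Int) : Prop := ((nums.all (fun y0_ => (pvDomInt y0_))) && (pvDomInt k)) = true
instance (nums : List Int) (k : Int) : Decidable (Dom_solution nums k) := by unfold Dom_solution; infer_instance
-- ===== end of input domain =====

-- B replaces A's O(n*k) materialisation of every nums[i]+x (x in -k..k) with the
-- closed form max(nums)-min(nums)+2k, keeping A's k==0 special case (objective: faster).

-- ===== PORT A =====
def solution (nums : List Int) (k : Int) : Int :=
  if k = 0 then 0
  else
    -- Python's list is an Array here so the port's extend is amortized O(1), like Python's
    let sol_array : Array Int :=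
      (PySem.List.pyRange 0 (nums.length : Int) 1).foldl (fun sol i =>
        (PySem.List.pyRange (-k) (k + 1) 1).foldl (fun sol x =>
          let temp_array : Array Int := #[]
          let temp_array := temp_array.push (PySem.List.pyGetD nums i 0 + x)
          sol ++ temp_array) sol) #[]
    (PySem.List.max? sol_array.toList (fun y => y)).getD 0
      - (PySem.List.min? sol_array.toList (fun y => y)).getD 0

-- ===== PORT B =====
def solution_alt (nums : List Int) (k : Int) : Int :=
  if k = 0 then 0
  else
    (PySem.List.max? nums (fun y => y)).getD 0
      - (PySem.List.min? nums (fun y => y)).getD 0 + 2 * k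

-- ===== PRECONDITION & SPEC =====
-- Pre_ excludes exactly the inputs where A raises ValueError (max of an empty list):
-- nums empty with k ≠ 0, or k < 0 (then range(-k,k+1) is empty so sol_array stays empty).
def Pre_solution (nums : List Int) (k : Int) : Prop := k = 0 ∨ (nums ≠ [] ∧ 0 < k)
instance (nums : List Int) (k : Int) : Decidable (Pre_solution nums k) := by unfold Pre_solution; infer_instance

def pvWitness_solution : List Int × Int := ([3, -1, 4], 2)

def Spec_solution (nums : List Int) (k : Int) (out : Int) : Prop := out = solution_alt nums k
instance (nums : List Int) (k : Int) (out : Int) : Decidable (Spec_solution nums k out) := by unfold Spec_solution; infer_instance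

-- ===== CLAIM (what is proved, stated in full; the proofs are below) =====
def Claim_equal_solution : Prop := ∀ (nums : List Int) (k : Int), Dom_solution nums k → Pre_solution nums k → Spec_solution nums k (solution nums k)

-- ===== LEMMAS AND PROOFS =====

-- toList commutes with a fold whose Array step mirrors a List step.
theorem toList_foldl_step {β : Type} (l : List β) (f : Array Int → β → Array Int)
    (g : List Int → β → List Int) (h : ∀ s x, (f s x).toList = g s.toList x) :
    ∀ (a : Array Int), (l.foldl f a).toList = l.foldl g a.toList := by
  induction l with
  | nil => intro a; rfl
  | cons x t ih => intro a; rw [List.foldl_cons, List.foldl_cons, ih, h]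

-- max over a mapped full range: the top element c + b wins.
theorem foldl_max_map_pyRange (a b c i : Int) (hab : a ≤ b) :
    ((PySem.List.pyRange a (b + 1) 1).map (fun x => c + x)).foldl max i = max i (c + b) := by
  rw [PySem.List.pyRange_one_succ_right hab, List.map_append, List.foldl_append]
  set l := (PySem.List.pyRange a b 1).map (fun x => c + x) with hl
  have h1 : i ≤ l.foldl max i := (PySem.List.le_foldl_max l i).1
  have h2 : l.foldl max i = i ∨ l.foldl max i ∈ l := PySem.List.foldl_max_mem l i
  have h3 : l.foldl max i ≤ max i (c + b) := by
    rcases h2 with h | h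
    · omega
    · rcases List.mem_map.mp h with ⟨x, hx, he⟩
      have := (PySem.List.mem_pyRange_one.mp hx).2
      omega
  show max (List.foldl max i l) (c + b) = max i (c + b)
  omega

-- min over a mapped range: the first element c + a wins.
theorem foldl_min_map_pyRange (a b c i : Int) (hab : a < b) :
    ((PySem.List.pyRange a b 1).map (fun x => c + x)).foldl min i = min i (c + a) := by
  rw [PySem.List.pyRange_one_cons hab]
  simp only [List.map_cons, List.foldl_cons]
  set l := (PySem.List.pyRange (a + 1) b 1).map (fun x => c + x) with hl
  have h1 : l.foldl min (min i (c + a)) ≤ min i (c + a) := (PySem.List.foldl_min_le l _).1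
  have h2 : l.foldl min (min i (c + a)) = min i (c + a) ∨ l.foldl min (min i (c + a)) ∈ l :=
    PySem.List.foldl_min_mem l _
  rcases h2 with h | h
  · exact h
  · rcases List.mem_map.mp h with ⟨x, hx, he⟩
    have := (PySem.List.mem_pyRange_one.mp hx).1
    omega

-- fold max over the flattened expansion = fold of (a + k) maxima over nums.
theorem foldl_max_flatMap (k : Int) (hk : 0 < k) :
    ∀ (t : List Int) (i : Int),
      (t.flatMap (fun a => (PySem.List.pyRange (-k) (k + 1) 1).map (fun x => a + x))).foldl max i
        = t.foldl (fun acc a => max acc (a + k)) i := by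
  intro t
  induction t with
  | nil => intro i; simp
  | cons a t ih =>
      intro i
      simp only [List.flatMap_cons, List.foldl_append, List.foldl_cons]
      rw [show ((PySem.List.pyRange (-k) (k + 1) 1).map (fun x => a + x)).foldl max i
            = max i (a + k) from foldl_max_map_pyRange (-k) k a i (by omega), ih]

theorem foldl_min_flatMap (k : Int) (hk : 0 < k) :
    ∀ (t : List Int) (i : Int),
      (t.flatMap (fun a => (PySem.List.pyRange (-k) (k + 1) 1).map (fun x => a + x))).foldl min i
        = t.foldl (fun acc a => min acc (a + -k)) i := by
  intro t
  induction t with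
  | nil => intro i; simp
  | cons a t ih =>
      intro i
      simp only [List.flatMap_cons, List.foldl_append, List.foldl_cons]
      rw [show ((PySem.List.pyRange (-k) (k + 1) 1).map (fun x => a + x)).foldl min i
            = min i (a + -k) from foldl_min_map_pyRange (-k) (k + 1) a i (by omega), ih]

theorem foldl_max_shift (k : Int) :
    ∀ (t : List Int) (c : Int),
      t.foldl (fun acc a => max acc (a + k)) (c + k) = t.foldl max c + k := by
  intro t
  induction t with
  | nil => intro c; simp
  | cons a t ih =>
      intro c
      simp only [List.foldl_cons]
      rw [show max (c + k) (a + k) = max c a + k by omega, ih]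

theorem foldl_min_shift (k : Int) :
    ∀ (t : List Int) (c : Int),
      t.foldl (fun acc a => min acc (a + -k)) (c + -k) = t.foldl min c + -k := by
  intro t
  induction t with
  | nil => intro c; simp
  | cons a t ih =>
      intro c
      simp only [List.foldl_cons]
      rw [show min (c + -k) (a + -k) = min c a + -k by omega, ih]

theorem solution_spec : Claim_equal_solution := by
  intro nums k _ hpre
  unfold Spec_solution solution solution_alt
  rcases hpre with rfl | ⟨hne, hk⟩
  · simp
  have hk0 : k ≠ 0 := by omega
  rw [if_neg hk0, if_neg hk0]
  -- move A's Array accumulator to the corresponding List fold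
  have hinner : ∀ (i : Int) (s : Array Int),
      ((PySem.List.pyRange (-k) (k + 1) 1).foldl
        (fun sol x => sol ++ ((#[] : Array Int).push (PySem.List.pyGetD nums i 0 + x))) s).toList
      = (PySem.List.pyRange (-k) (k + 1) 1).foldl
        (fun sol x => sol ++ [PySem.List.pyGetD nums i 0 + x]) s.toList := by
    intro i s
    exact toList_foldl_step _ _ _ (fun s x => by simp) s
  simp only []
  rw [toList_foldl_step _ _
        (fun sl i => (PySem.List.pyRange (-k) (k + 1) 1).foldl
          (fun sol x => sol ++ [PySem.List.pyGetD nums i 0 + x]) sl)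
        (fun s i => hinner i s) #[]]
  -- reshape A's nested fold into a flatMap over nums
  rw [show (fun (sol : List Int) (i : Int) =>
        (PySem.List.pyRange (-k) (k + 1) 1).foldl
          (fun sol x => sol ++ [PySem.List.pyGetD nums i 0 + x]) sol)
      = (fun (sol : List Int) (i : Int) =>
        sol ++ (PySem.List.pyRange (-k) (k + 1) 1).map (fun x => PySem.List.pyGetD nums i 0 + x)) from by
    funext sol i; exact PySem.List.foldl_append_singleton_eq_map _ _ _]
  rw [PySem.List.foldl_append_eq_flatMap]
  rw [show (PySem.List.pyRange 0 (nums.length : Int) 1).flatMap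
        (fun i => (PySem.List.pyRange (-k) (k + 1) 1).map (fun x => PySem.List.pyGetD nums i 0 + x))
      = nums.flatMap (fun a => (PySem.List.pyRange (-k) (k + 1) 1).map (fun x => a + x)) from by
    rw [List.flatMap_def, List.flatMap_def,
        show (fun i => (PySem.List.pyRange (-k) (k + 1) 1).map (fun x => PySem.List.pyGetD nums i 0 + x))
          = (fun a => (PySem.List.pyRange (-k) (k + 1) 1).map (fun x => a + x))
            ∘ (fun j => PySem.List.pyGetD nums j 0) from rfl,
        ← List.map_map, PySem.List.map_pyGetD_pyRange_zero']]
  rcases nums with _ | ⟨n, t⟩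
  · exact absurd rfl hne
  -- expose the head of the flattened list
  rw [List.flatMap_cons,
      show (PySem.List.pyRange (-k) (k + 1) 1).map (fun x => n + x)
        = (n + -k) :: (PySem.List.pyRange (-k + 1) (k + 1) 1).map (fun x => n + x) from by
        rw [PySem.List.pyRange_one_cons (by omega)]; simp,
      List.cons_append]
  simp only [List.nil_append]
  rw [PySem.List.max?_id_cons, PySem.List.min?_id_cons, PySem.List.max?_id_cons,
      PySem.List.min?_id_cons]
  simp only [Option.getD_some]
  rw [List.foldl_append, List.foldl_append,
      foldl_max_map_pyRange (-k + 1) k n (n + -k) (by omega),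
      foldl_min_map_pyRange (-k + 1) (k + 1) n (n + -k) (by omega),
      show max (n + -k) (n + k) = n + k by omega,
      show min (n + -k) (n + (-k + 1)) = n + -k by omega,
      foldl_max_flatMap k hk, foldl_min_flatMap k hk,
      foldl_max_shift k t n, foldl_min_shift k t n]
  omega
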